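-- pv_equiv track=rewrite | github.com/cojocar/iskip-tests | bsearch/bsearch_gen.py | generate_bsearch
-- ===== SOURCE A (Python) =====
-- def generate_bsearch(t=0, level=1):
--     if level == 0:
--         return ''
--     s = ''
--     s += '\t'*t + '/* start lvl=%s */\n' % (level)
--     s += '\t'*t + 'm = (l+r)/2;\n'
--     s += '\t'*t     + 'if (a[m] == x) {\n'
--     s += '\t'*(t+1) +  'MY_PRINTS_FOUND("O");\n'
--     s += '\t'*(t)   + '} else if (a[m] < x) {\n'
--     s += '\t'*(t+1) +  'l = m+1;\n'
--     s += '\t'*(t+1) +  'MY_PRINTS("R");\n'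
--     s += '\t'*(t+1) +  'CHECK;\n'
--     s += generate_bsearch(t+1, level-1)
--     s += '\t'*(t) +  '} else {\n'
--     s += '\t'*(t+1) +  'r = m-1;\n'
--     s += '\t'*(t+1) +  'MY_PRINTS("L");\n'
--     s += '\t'*(t+1) +  'CHECK;\n'
--     s += generate_bsearch(t+1, level-1)
--     s += '\t'*(t) +  '}\n'
--     s += '\t'*t + '/* end lvl=%s */\n' % (level)
--     return s
-- ===== SOURCE B (Python) =====
-- def _block(u, i, inner):
--     ind, ind1 = '\t' * u, '\t' * (u + 1)
--     return (
--         ind + '/* start lvl=%s */\n' % (i)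
--         + ind + 'm = (l+r)/2;\n'
--         + ind + 'if (a[m] == x) {\n'
--         + ind1 + 'MY_PRINTS_FOUND("O");\n'
--         + ind + '} else if (a[m] < x) {\n'
--         + ind1 + 'l = m+1;\n'
--         + ind1 + 'MY_PRINTS("R");\n'
--         + ind1 + 'CHECK;\n'
--         + inner
--         + ind + '} else {\n'
--         + ind1 + 'r = m-1;\n'
--         + ind1 + 'MY_PRINTS("L");\n'
--         + ind1 + 'CHECK;\n'
--         + inner
--         + ind + '}\n'
--         + ind + '/* end lvl=%s */\n' % (i)
--     )
--
--
-- def generate_bsearch(t=0, level=1):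
--     s = ''
--     for i in range(1, level + 1):
--         s = _block(t + level - i, i, s)
--     return s
-- ===== Notes on version B (the rewrite author's own statement) =====
-- stated objective: alternative
-- what changed: Replaces A's top-down binary tree recursion (two recursive calls per level) with a bottom-up iterative accumulator that builds each level's block once and embeds it twice, looping i from 1 to level.
import Mathlib
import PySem

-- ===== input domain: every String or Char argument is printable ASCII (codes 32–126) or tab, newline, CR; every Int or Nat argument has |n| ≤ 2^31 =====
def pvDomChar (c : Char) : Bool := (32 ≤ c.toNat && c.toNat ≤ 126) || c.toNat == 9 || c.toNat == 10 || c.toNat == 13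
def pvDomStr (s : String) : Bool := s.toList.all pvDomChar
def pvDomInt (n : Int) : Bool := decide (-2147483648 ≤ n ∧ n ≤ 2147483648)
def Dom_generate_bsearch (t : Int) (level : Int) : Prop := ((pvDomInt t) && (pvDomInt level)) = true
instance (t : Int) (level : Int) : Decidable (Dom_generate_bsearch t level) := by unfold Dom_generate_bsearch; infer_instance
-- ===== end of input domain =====

-- B rebuilds the nested C code bottom-up with an iterative accumulator (one shared inner block per level)
-- instead of A's top-down binary tree recursion; equivalent for level ≥ 0 (A infinitely recurses for level < 0).


-- ===== PORT A =====
-- '\t'*u : Python string repetition (empty for u ≤ 0), at the List Char level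
def pvTabs (u : Int) : List Char := PySem.List.pyRepeat ['\t'] u

-- A's recursion on `level`, run on fuel `level.toNat` (exact for level ≥ 0; for level < 0
-- Python A hits infinite recursion, excluded by Pre_). Each `s += …` line of A is one `++` group.
def pvGenA (t : Int) : Nat → List Char
  | 0 => []
  | n + 1 =>
      pvTabs t ++ "/* start lvl=".toList ++ PySem.Int.toChars ((n : Int) + 1) ++ " */\n".toList
      ++ pvTabs t ++ "m = (l+r)/2;\n".toList
      ++ pvTabs t ++ "if (a[m] == x) {\n".toList
      ++ pvTabs (t + 1) ++ "MY_PRINTS_FOUND(\"O\");\n".toList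
      ++ pvTabs t ++ "} else if (a[m] < x) {\n".toList
      ++ pvTabs (t + 1) ++ "l = m+1;\n".toList
      ++ pvTabs (t + 1) ++ "MY_PRINTS(\"R\");\n".toList
      ++ pvTabs (t + 1) ++ "CHECK;\n".toList
      ++ pvGenA (t + 1) n
      ++ pvTabs t ++ "} else {\n".toList
      ++ pvTabs (t + 1) ++ "r = m-1;\n".toList
      ++ pvTabs (t + 1) ++ "MY_PRINTS(\"L\");\n".toList
      ++ pvTabs (t + 1) ++ "CHECK;\n".toList
      ++ pvGenA (t + 1) n
      ++ pvTabs t ++ "}\n".toList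
      ++ pvTabs t ++ "/* end lvl=".toList ++ PySem.Int.toChars ((n : Int) + 1) ++ " */\n".toList

def generate_bsearch (t : Int) (level : Int) : String :=
  String.ofList (pvGenA t level.toNat)

-- ===== PORT B =====
-- Source B's _block(u, i, inner): the level-i block with indent u, embedding `inner` twice
def pvBlockB (u : Int) (i : Int) (inner : List Char) : List Char :=
  pvTabs u ++ "/* start lvl=".toList ++ PySem.Int.toChars i ++ " */\n".toList
  ++ pvTabs u ++ "m = (l+r)/2;\n".toList
  ++ pvTabs u ++ "if (a[m] == x) {\n".toList
  ++ pvTabs (u + 1) ++ "MY_PRINTS_FOUND(\"O\");\n".toList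
  ++ pvTabs u ++ "} else if (a[m] < x) {\n".toList
  ++ pvTabs (u + 1) ++ "l = m+1;\n".toList
  ++ pvTabs (u + 1) ++ "MY_PRINTS(\"R\");\n".toList
  ++ pvTabs (u + 1) ++ "CHECK;\n".toList
  ++ inner
  ++ pvTabs u ++ "} else {\n".toList
  ++ pvTabs (u + 1) ++ "r = m-1;\n".toList
  ++ pvTabs (u + 1) ++ "MY_PRINTS(\"L\");\n".toList
  ++ pvTabs (u + 1) ++ "CHECK;\n".toList
  ++ inner
  ++ pvTabs u ++ "}\n".toList
  ++ pvTabs u ++ "/* end lvl=".toList ++ PySem.Int.toChars i ++ " */\n".toList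

-- Source B's loop: for i in range(1, level+1): s = _block(t + level - i, i, s)
def generate_bsearch_alt (t : Int) (level : Int) : String :=
  String.ofList
    ((PySem.List.pyRange 1 (level + 1) 1).foldl
      (fun s i => pvBlockB (t + level - i) i s) [])

-- ===== PRECONDITION & SPEC =====
-- Pre_ excludes level < 0, on which Python A recurses forever (RecursionError); A returns on all level ≥ 0.
def Pre_generate_bsearch (t : Int) (level : Int) : Prop := 0 ≤ level
instance (t : Int) (level : Int) : Decidable (Pre_generate_bsearch t level) := by unfold Pre_generate_bsearch; infer_instance
def pvWitness_generate_bsearch : Int × Int := (0, 2)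

def Spec_generate_bsearch (t : Int) (level : Int) (out : String) : Prop := out = generate_bsearch_alt t level
instance (t : Int) (level : Int) (out : String) : Decidable (Spec_generate_bsearch t level out) := by unfold Spec_generate_bsearch; infer_instance

-- ===== CLAIM (what is proved, stated in full; the proofs are below) =====
def Claim_equal_generate_bsearch : Prop := ∀ (t : Int) (level : Int), Dom_generate_bsearch t level → Pre_generate_bsearch t level → Spec_generate_bsearch t level (generate_bsearch t level)

-- ===== LEMMAS AND PROOFS =====

-- B's bottom-up fold up to level n equals A's recursion at fuel n (induction on n, generalizing t).
theorem pvFold_eq_genA (n : Nat) : ∀ t : Int,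
    ((PySem.List.pyRange 1 ((n : Int) + 1) 1).foldl
      (fun s i => pvBlockB (t + n - i) i s) []) = pvGenA t n := by
  induction n with
  | zero => intro t; simp [pvGenA]
  | succ n ih =>
      intro t
      have hle : (1 : Int) ≤ (n : Int) + 1 := by omega
      have hr : PySem.List.pyRange 1 ((n : Int) + 1 + 1) 1
          = PySem.List.pyRange 1 ((n : Int) + 1) 1 ++ [(n : Int) + 1] :=
        PySem.List.pyRange_one_succ_right hle
      push_cast
      rw [hr, List.foldl_append]
      have hfun : (PySem.List.pyRange 1 ((n : Int) + 1) 1).foldl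
            (fun s i => pvBlockB (t + ((n : Int) + 1) - i) i s) []
          = (PySem.List.pyRange 1 ((n : Int) + 1) 1).foldl
            (fun s i => pvBlockB ((t + 1) + (n : Int) - i) i s) [] := by
        apply PySem.List.foldl_congr_mem
        intro s i _
        have h : t + ((n : Int) + 1) - i = (t + 1) + (n : Int) - i := by ring
        rw [h]
      rw [hfun, ih (t + 1)]
      simp only [List.foldl_cons, List.foldl_nil]
      rw [show t + ((n : Int) + 1) - ((n : Int) + 1) = t from by ring]
      rfl

-- ===== VERDICT (by name: the statement is the Claim_ definition above) =====
theorem generate_bsearch_spec : Claim_equal_generate_bsearch := by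
  intro t level _ hpre
  unfold Spec_generate_bsearch generate_bsearch generate_bsearch_alt
  have hlv : ((level.toNat : Int)) = level := Int.toNat_of_nonneg hpre
  have h := pvFold_eq_genA level.toNat t
  rw [hlv] at h
  rw [h]
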